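-- pv_equiv track=rewrite | github.com/k-harada/AtCoder | ADT/20231019/E.py | solve
-- ===== SOURCE A (Python) =====
-- def solve(n, a_list):
--     odd = []
--     even = []
--     for a in a_list:
--         if a % 2 == 1:
--             odd.append(a)
--         else:
--             even.append(a)
--     res = -1
--     odd_s = list(sorted(odd))
--     even_s = list(sorted(even))
--     if len(odd_s) >= 2:
--         res = max(res, odd_s[-1] + odd_s[-2])
--     if len(even_s) >= 2:
--         res = max(res, even_s[-1] + even_s[-2])
--     return res
-- ===== SOURCE B (Python) =====
-- def solve(n, a_list):
--     # Single pass: track the two largest odd and two largest even values.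
--     o1 = o2 = e1 = e2 = None
--     for a in a_list:
--         if a % 2 == 1:
--             if o1 is None or o1 <= a:
--                 o1, o2 = a, o1
--             elif o2 is None or o2 <= a:
--                 o2 = a
--         else:
--             if e1 is None or e1 <= a:
--                 e1, e2 = a, e1
--             elif e2 is None or e2 <= a:
--                 e2 = a
--     res = -1
--     if o2 is not None:
--         res = max(res, o1 + o2)
--     if e2 is not None:
--         res = max(res, e1 + e2)
--     return res
-- ===== Notes on version B (the rewrite author's own statement) =====
-- stated objective: faster
-- what changed: Replaces the partition-then-sort-each-class approach by a single pass that tracks the two largest odd and two largest even values, eliminating sorting entirely.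
import Mathlib
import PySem

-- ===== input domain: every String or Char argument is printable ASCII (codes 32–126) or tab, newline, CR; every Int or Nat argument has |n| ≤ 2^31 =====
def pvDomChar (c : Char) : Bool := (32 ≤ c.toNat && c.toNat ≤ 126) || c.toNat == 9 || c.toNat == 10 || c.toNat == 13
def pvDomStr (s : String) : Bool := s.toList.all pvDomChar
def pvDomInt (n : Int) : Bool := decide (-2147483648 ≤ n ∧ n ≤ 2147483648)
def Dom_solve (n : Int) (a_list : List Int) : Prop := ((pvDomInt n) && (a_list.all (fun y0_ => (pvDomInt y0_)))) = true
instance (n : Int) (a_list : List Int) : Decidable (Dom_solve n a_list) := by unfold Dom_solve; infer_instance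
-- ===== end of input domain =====

-- B replaces A's partition-then-sort-each-parity-class by a single pass tracking the
-- two largest odd and two largest even values (objective: faster, O(n) instead of O(n log n)).

-- ===== PORT A =====
def solve (n : Int) (a_list : List Int) : Int :=
  let p := a_list.foldl
    (fun (s : List Int × List Int) a =>
      if PySem.Int.mod a 2 = 1 then (s.1 ++ [a], s.2) else (s.1, s.2 ++ [a]))
    ([], [])
  let res : Int := -1
  let odd_s := PySem.List.sorted p.1 (fun x => x) false
  let even_s := PySem.List.sorted p.2 (fun x => x) false
  let res := if 2 ≤ PySem.List.len odd_s then
      max res (PySem.List.pyGetD odd_s (-1) 0 + PySem.List.pyGetD odd_s (-2) 0) else res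
  let res := if 2 ≤ PySem.List.len even_s then
      max res (PySem.List.pyGetD even_s (-1) 0 + PySem.List.pyGetD even_s (-2) 0) else res
  res

-- ===== PORT B =====
-- one parity class's running state: (largest so far, second largest so far)
def pvStep (st : Option Int × Option Int) (a : Int) : Option Int × Option Int :=
  match st with
  | (none, _) => (some a, none)
  | (some m1, o2) =>
    if m1 ≤ a then (some a, some m1)
    else
      match o2 with
      | none => (some m1, some a)
      | some m2 => if m2 ≤ a then (some m1, some a) else (some m1, some m2)

def pvBest (st : Option Int × Option Int) (res : Int) : Int :=
  match st with
  | (some m1, some m2) => max res (m1 + m2)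
  | _ => res

def solve_alt (n : Int) (a_list : List Int) : Int :=
  let st := a_list.foldl
    (fun (s : (Option Int × Option Int) × (Option Int × Option Int)) a =>
      if PySem.Int.mod a 2 = 1 then (pvStep s.1 a, s.2) else (s.1, pvStep s.2 a))
    ((none, none), (none, none))
  let res : Int := -1
  let res := pvBest st.1 res
  let res := pvBest st.2 res
  res

-- ===== PRECONDITION & SPEC =====
def Spec_solve (n : Int) (a_list : List Int) (out : Int) : Prop := out = solve_alt n a_list
instance (n : Int) (a_list : List Int) (out : Int) : Decidable (Spec_solve n a_list out) := by unfold Spec_solve; infer_instance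

-- ===== CLAIM (what is proved, stated in full; the proofs are below) =====
def Claim_equal_solve : Prop := ∀ (n : Int) (a_list : List Int), Dom_solve n a_list → Spec_solve n a_list (solve n a_list)

-- ===== LEMMAS AND PROOFS =====

-- the last two elements of a list, last first (for a sorted list: the two largest)
def pvLastTwo : List Int → Option Int × Option Int
  | [] => (none, none)
  | [a] => (some a, none)
  | [a, b] => (some b, some a)
  | _ :: b :: c :: t => pvLastTwo (b :: c :: t)

-- a loop over two independent accumulators, choosing by a predicate, splits into two filtered loops
theorem pv_foldl_split {σ τ : Type} (p : Int → Prop) [DecidablePred p]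
    (f : σ → Int → σ) (g : τ → Int → τ) :
    ∀ (l : List Int) (s : σ) (t : τ),
      l.foldl (fun st a => if p a then (f st.1 a, st.2) else (st.1, g st.2 a)) (s, t)
        = ((l.filter (fun a => decide (p a))).foldl f s,
           (l.filter (fun a => !decide (p a))).foldl g t)
  | [], s, t => rfl
  | a :: l, s, t => by
    by_cases h : p a <;> simp [h, pv_foldl_split p f g l]

theorem pv_sorted_snoc (l : List Int) (x : Int) :
    PySem.List.sorted (l ++ [x]) (fun y => y) false
      = PySem.List.insertBy (fun a b => decide (a < b)) x (PySem.List.sorted l (fun y => y) false) := by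
  rw [PySem.List.sorted_eq_foldl_insertBy, PySem.List.sorted_eq_foldl_insertBy, List.foldl_append]
  rfl

theorem pv_insertBy_cons (bf : Int → Int → Bool) (x y : Int) (ys : List Int) :
    PySem.List.insertBy bf x (y :: ys) =
      if bf x y then x :: y :: ys else y :: PySem.List.insertBy bf x ys := by
  simp [PySem.List.insertBy]

theorem pv_insertBy_length (bf : Int → Int → Bool) (x : Int) :
    ∀ (c : List Int), (PySem.List.insertBy bf x c).length = c.length + 1
  | [] => rfl
  | y :: ys => by
    rw [pv_insertBy_cons]
    by_cases h : bf x y = true <;> simp [h, pv_insertBy_length bf x ys]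

theorem pvLastTwo_mem : ∀ (c : List Int) (m : Int),
    ((pvLastTwo c).1 = some m ∨ (pvLastTwo c).2 = some m) → m ∈ c
  | [], m => by simp [pvLastTwo]
  | [a], m => by
    rintro (h | h)
    · simp [pvLastTwo] at h; simp [h]
    · simp [pvLastTwo] at h
  | [a, b], m => by
    rintro (h | h) <;> simp [pvLastTwo] at h <;> simp [h]
  | a :: b :: c :: t, m => by
    intro h
    have := pvLastTwo_mem (b :: c :: t) m (by simpa [pvLastTwo] using h)
    simp_all

theorem pvLastTwo_of_two : ∀ (c : List Int), 2 ≤ c.length →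
    ∃ m1 m2, pvLastTwo c = (some m1, some m2)
  | [], h => by simp at h
  | [a], h => by simp at h
  | [a, b], _ => ⟨b, a, rfl⟩
  | a :: b :: c :: t, _ => by
    obtain ⟨m1, m2, h⟩ := pvLastTwo_of_two (b :: c :: t) (by simp)
    exact ⟨m1, m2, by simpa [pvLastTwo] using h⟩

-- step on a sorted list: inserting x and reading the last two = updating the top-two state with x
theorem pv_step_insert : ∀ (c : List Int), c.Pairwise (· ≤ ·) → ∀ (x : Int),
    pvLastTwo (PySem.List.insertBy (fun a b => decide (a < b)) x c) = pvStep (pvLastTwo c) x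
  | [], _, x => rfl
  | y :: t, hp, x => by
    have hyt : ∀ z ∈ t, y ≤ z := (List.pairwise_cons.1 hp).1
    have hpt : t.Pairwise (· ≤ ·) := (List.pairwise_cons.1 hp).2
    rw [pv_insertBy_cons]
    by_cases hxy : x < y
    · -- x goes in front: the running top-two pair is unchanged (unless the list was short)
      simp only [hxy, decide_true, if_true]
      match t with
      | [] => simp [pvLastTwo, pvStep, not_le.2 hxy]
      | [b] =>
        have hyb : y ≤ b := hyt b (by simp)
        simp [pvLastTwo, pvStep, not_le.2 hxy, not_le.2 (lt_of_lt_of_le hxy hyb)]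
      | b :: c :: r =>
        show pvLastTwo (b :: c :: r) = pvStep (pvLastTwo (b :: c :: r)) x
        obtain ⟨m1, m2, hm⟩ := pvLastTwo_of_two (b :: c :: r) (by simp)
        have h1 : m1 ∈ b :: c :: r := pvLastTwo_mem _ m1 (Or.inl (by rw [hm]))
        have h2 : m2 ∈ b :: c :: r := pvLastTwo_mem _ m2 (Or.inr (by rw [hm]))
        have hx1 : ¬ m1 ≤ x := not_le.2 (lt_of_lt_of_le hxy (hyt m1 h1))
        have hx2 : ¬ m2 ≤ x := not_le.2 (lt_of_lt_of_le hxy (hyt m2 h2))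
        rw [hm]; simp [pvStep, hx1, hx2]
    · -- y ≤ x: x is inserted somewhere behind y
      have hyx : y ≤ x := not_lt.1 hxy
      simp only [hxy, decide_false, Bool.false_eq_true, if_false]
      match t with
      | [] => simp [PySem.List.insertBy, pvLastTwo, pvStep, hyx]
      | b :: r =>
        have hrec := pv_step_insert (b :: r) hpt x
        have hlen := pv_insertBy_length (fun a b => decide (a < b)) x (b :: r)
        rcases hI : PySem.List.insertBy (fun a b => decide (a < b)) x (b :: r) with _ | ⟨u, _ | ⟨v, w⟩⟩
        · rw [hI] at hlen; simp at hlen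
        · rw [hI] at hlen; simp at hlen
        · rw [hI] at hrec
          show pvLastTwo (y :: u :: v :: w) = pvStep (pvLastTwo (y :: b :: r)) x
          rw [show pvLastTwo (y :: u :: v :: w) = pvLastTwo (u :: v :: w) from rfl, hrec]
          match r with
          | [] => by_cases hbx : b ≤ x <;> simp [pvLastTwo, pvStep, hbx, hyx]
          | c :: r' => rfl

-- the single pass computes exactly the last two elements of the sorted list
theorem pv_fold_eq_lastTwo_sorted (l : List Int) :
    l.foldl pvStep (none, none) = pvLastTwo (PySem.List.sorted l (fun y => y) false) := by
  induction l using List.reverseRecOn with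
  | nil => rfl
  | append_singleton l x ih =>
    rw [List.foldl_append, List.foldl_cons, List.foldl_nil, ih, pv_sorted_snoc]
    have hp : (PySem.List.sorted l (fun y => y) false).Pairwise (· ≤ ·) := by
      simpa using PySem.List.sorted_pairwise (xs := l) (key := fun y => y)
    exact (pv_step_insert _ hp x).symm

-- A's tail computation on a class list = pvBest of its last two
theorem pv_best_eq : ∀ (s : List Int) (res : Int),
    (if 2 ≤ PySem.List.len s then
        max res (PySem.List.pyGetD s (-1) 0 + PySem.List.pyGetD s (-2) 0) else res)
      = pvBest (pvLastTwo s) res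
  | [], res => by simp [PySem.List.len, pvLastTwo, pvBest]
  | [a], res => by simp [PySem.List.len, pvLastTwo, pvBest]
  | [a, b], res => by
    simp [PySem.List.len, pvLastTwo, pvBest, PySem.List.pyGetD, PySem.List.pyIdx?, PySem.List.pyGet?]
  | a :: b :: c :: t, res => by
    have ih := pv_best_eq (b :: c :: t) res
    have h2 : 2 ≤ PySem.List.len (a :: b :: c :: t) := by simp [PySem.List.len]; omega
    have h2' : 2 ≤ PySem.List.len (b :: c :: t) := by simp [PySem.List.len]; omega
    rw [if_pos h2] at *
    rw [if_pos h2'] at ih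
    have e1 : PySem.List.pyGetD (a :: b :: c :: t) (-1) 0 = PySem.List.pyGetD (b :: c :: t) (-1) 0 := by
      simp [PySem.List.pyGetD, PySem.List.pyGet?, PySem.List.pyIdx?]
      rw [if_pos (by omega : (-1:Int) ≤ 1 + (t.length:Int))]
      simp
    have e2 : PySem.List.pyGetD (a :: b :: c :: t) (-2) 0 = PySem.List.pyGetD (b :: c :: t) (-2) 0 := by
      simp [PySem.List.pyGetD, PySem.List.pyGet?, PySem.List.pyIdx?]
      rfl
    rw [e1, e2, ih]
    rfl

-- ===== VERDICT (by name: the statement is the Claim_ definition above) =====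
theorem solve_spec : Claim_equal_solve := by
  intro n a_list _
  unfold Spec_solve solve solve_alt
  rw [pv_foldl_split (fun a => PySem.Int.mod a 2 = 1)
        (fun (acc : List Int) a => acc ++ [a]) (fun (acc : List Int) a => acc ++ [a]),
      pv_foldl_split (fun a => PySem.Int.mod a 2 = 1) pvStep pvStep]
  simp only [PySem.List.foldl_append_singleton_eq_self, List.nil_append]
  rw [pv_fold_eq_lastTwo_sorted, pv_fold_eq_lastTwo_sorted, pv_best_eq, pv_best_eq]
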